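-- pv_equiv track=rewrite | github.com/kgpayne/book-recommendations | OLD/tim_ferriss_show_people/processing_pipeline.py | quotes_to_brackets
-- ===== SOURCE A (Python) =====
-- def quotes_to_brackets(text):
--     new_text = ''
--     first_bracket = True
--     for char in text:
--         if char == '"' and first_bracket:
--             new_text += '('
--             first_bracket = False
--         elif char == '"' and not first_bracket:
--             new_text += ')'
--             first_bracket = False
--         else:
--             new_text += char
--     return new_text
-- ===== SOURCE B (Python) =====
-- def quotes_to_brackets(text):
--     i = text.find('"')
--     if i == -1:
--         return text
--     return text[:i] + '(' + text[i + 1:].replace('"', ')')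
-- ===== Notes on version B (the rewrite author's own statement) =====
-- stated objective: faster
-- what changed: Replaces the per-character accumulator loop with a boolean flag by find/slice/replace: locate the first quote, keep the prefix, emit an opening parenthesis there, and replace every later quote with a closing parenthesis.
import Mathlib
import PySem

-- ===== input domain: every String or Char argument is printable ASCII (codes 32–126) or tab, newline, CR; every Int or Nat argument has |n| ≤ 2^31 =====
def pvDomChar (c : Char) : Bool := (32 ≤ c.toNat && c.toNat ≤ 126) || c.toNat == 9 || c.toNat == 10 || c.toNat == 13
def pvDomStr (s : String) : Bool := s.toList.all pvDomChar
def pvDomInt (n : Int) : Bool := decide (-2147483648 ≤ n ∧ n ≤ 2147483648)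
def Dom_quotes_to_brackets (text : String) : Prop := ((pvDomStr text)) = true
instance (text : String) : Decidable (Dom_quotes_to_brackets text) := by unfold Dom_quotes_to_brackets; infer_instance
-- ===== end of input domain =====

-- B replaces A's per-character accumulator loop (boolean "first quote" flag) by find/slice/replace:
-- keep the prefix before the first quote, an opening bracket there, then replace every later quote by a
-- closing bracket (measured faster: bulk slicing/replace instead of char-by-char concatenation).

-- ===== PORT A =====
-- A's loop: new_text accumulator plus first_bracket flag, one character at a time.
-- qtbStep is A's loop body (the three branches, in order).
def qtbStep (st : List Char × Bool) (c : Char) : List Char × Bool :=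
  if c = '"' ∧ st.2 = true then (st.1 ++ ['('], false)
  else if c = '"' ∧ ¬ st.2 = true then (st.1 ++ [')'], false)
  else (st.1 ++ [c], st.2)

def quotes_to_brackets (text : String) : String :=
  String.ofList ((text.toList.foldl qtbStep ([], true)).1)

-- ===== PORT B =====
-- Source B: i = text.find('"'); if i == -1: return text; return text[:i] + '(' + text[i+1:].replace('"', ')')
def quotes_to_brackets_alt (text : String) : String :=
  let i : Int := PySem.Str.find text "\""
  if i = -1 then text
  else
    String.ofList
      (PySem.List.slice text.toList none (some i) ++ ['('] ++
       PySem.Chars.replace (PySem.List.slice text.toList (some (i + 1)) none) ['"'] [')'])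

-- ===== PRECONDITION & SPEC =====
def Spec_quotes_to_brackets (text : String) (out : String) : Prop := out = quotes_to_brackets_alt text
instance (text : String) (out : String) : Decidable (Spec_quotes_to_brackets text out) := by unfold Spec_quotes_to_brackets; infer_instance

-- ===== CLAIM (what is proved, stated in full; the proofs are below) =====
def Claim_equal_quotes_to_brackets : Prop := ∀ (text : String), Dom_quotes_to_brackets text → Spec_quotes_to_brackets text (quotes_to_brackets text)

-- ===== LEMMAS AND PROOFS =====

-- Character image once the first quote has been seen (or for the suffix after it).
def qtbRepl (c : Char) : Char := if c = '"' then ')' else c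

-- Proof-side reformulation of A's loop body as a structural recursion returning the emitted suffix.
def qtbGo : List Char → Bool → List Char
  | [], _ => []
  | c :: cs, first =>
      if c = '"' then (if first then '(' else ')') :: qtbGo cs false
      else c :: qtbGo cs first

theorem qtb_foldl_eq_go (cs : List Char) :
    ∀ (acc : List Char) (first : Bool),
      (cs.foldl qtbStep (acc, first)).1 = acc ++ qtbGo cs first := by
  induction cs with
  | nil => intro acc first; simp [qtbGo]
  | cons c cs ih =>
      intro acc first
      rw [List.foldl_cons]
      by_cases hc : c = '"'
      · cases first
        · rw [show qtbStep (acc, false) c = (acc ++ [')'], false) by simp [qtbStep, hc], ih]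
          simp [qtbGo, hc, List.append_assoc]
        · rw [show qtbStep (acc, true) c = (acc ++ ['('], false) by simp [qtbStep, hc], ih]
          simp [qtbGo, hc, List.append_assoc]
      · rw [show qtbStep (acc, first) c = (acc ++ [c], first) by simp [qtbStep, hc], ih]
        simp [qtbGo, hc, List.append_assoc]

theorem qtbGo_false (cs : List Char) : qtbGo cs false = cs.map qtbRepl := by
  induction cs with
  | nil => rfl
  | cons c cs ih =>
      by_cases hc : c = '"' <;> simp [qtbGo, qtbRepl, hc, ih]

theorem qtbGo_true_no_quote (cs : List Char) (h : '"' ∉ cs) : qtbGo cs true = cs := by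
  induction cs with
  | nil => rfl
  | cons c cs ih =>
      simp only [List.mem_cons, not_or] at h
      simp [qtbGo, Ne.symm h.1, ih h.2]

theorem qtbGo_true_split (pre suf : List Char) (h : '"' ∉ pre) :
    qtbGo (pre ++ '"' :: suf) true = pre ++ '(' :: suf.map qtbRepl := by
  induction pre with
  | nil => simp [qtbGo, qtbGo_false]
  | cons c pre ih =>
      simp only [List.mem_cons, not_or] at h
      simp [qtbGo, Ne.symm h.1, ih h.2]

-- Python's str.find for the one-character pattern '"'.
theorem qtb_find_go (cs : List Char) : ∀ (k : Nat),
    PySem.Chars.find.go ['"'] cs k =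
      if '"' ∈ cs then ((k + (cs.takeWhile (· ≠ '"')).length : Nat) : Int) else -1 := by
  induction cs with
  | nil => intro k; simp [PySem.Chars.find.go]
  | cons c cs ih =>
      intro k
      by_cases hc : c = '"'
      · simp [PySem.Chars.find.go, hc, List.isPrefixOf]
      · have hpre : List.isPrefixOf ['"'] (c :: cs) = false := by
          simpa [List.isPrefixOf] using Ne.symm hc
        rw [PySem.Chars.find.go.eq_def]
        simp only [hpre, Bool.false_eq_true, if_false, ih (k + 1)]
        by_cases hm : '"' ∈ cs
        · rw [if_pos hm, if_pos (show '"' ∈ c :: cs from List.mem_cons_of_mem _ hm)]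
          have htw : List.takeWhile (fun x => decide (x ≠ '"')) (c :: cs)
              = c :: List.takeWhile (fun x => decide (x ≠ '"')) cs := by
            simp [hc]
          rw [htw, List.length_cons]
          push_cast
          omega
        · simp [hm, Ne.symm hc]

-- Python's str.replace('"', ')') maps every quote to ')'.
theorem qtb_replace_go (fuel : Nat) : ∀ (l acc : List Char), l.length ≤ fuel →
    PySem.Chars.replace.go ['"'] [')'] fuel l acc = acc.reverse ++ l.map qtbRepl := by
  induction fuel with
  | zero =>
      intro l acc hl
      have : l = [] := by simpa using List.eq_nil_of_length_eq_zero (Nat.le_zero.mp hl)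
      simp [this, PySem.Chars.replace.go]
  | succ fuel ih =>
      intro l acc hl
      cases l with
      | nil => simp [PySem.Chars.replace.go]
      | cons c t =>
          by_cases hc : c = '"'
          · have hpre : List.isPrefixOf ['"'] (c :: t) = true := by
              simp [List.isPrefixOf, hc]
            rw [PySem.Chars.replace.go.eq_def]
            simp only [hpre, if_true]
            rw [show List.drop (['"'].length) (c :: t) = t from rfl,
                show ([')'].reverse ++ acc) = ')' :: acc from rfl]
            rw [ih t ((')') :: acc) (by simpa using Nat.lt_succ_iff.mp (by simpa using hl))]
            simp [qtbRepl, hc]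
          · have hpre : List.isPrefixOf ['"'] (c :: t) = false := by
              simpa [List.isPrefixOf] using Ne.symm hc
            rw [PySem.Chars.replace.go.eq_def]
            simp only [hpre, Bool.false_eq_true, if_false]
            rw [ih t (c :: acc) (by simpa using Nat.lt_succ_iff.mp (by simpa using hl))]
            simp [qtbRepl, hc]

theorem qtb_replace (l : List Char) :
    PySem.Chars.replace l ['"'] [')'] = l.map qtbRepl := by
  rw [PySem.Chars.replace]
  simp [qtb_replace_go l.length l [] (le_refl _)]

-- ===== VERDICT (by name: the statement is the Claim_ definition above) =====
theorem quotes_to_brackets_spec : Claim_equal_quotes_to_brackets := by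
  intro text _
  unfold Spec_quotes_to_brackets quotes_to_brackets quotes_to_brackets_alt
  have hfind : PySem.Str.find text "\"" = PySem.Chars.find.go ['"'] text.toList 0 := by
    simp [PySem.Str.find, PySem.Chars.find]
  rw [qtb_foldl_eq_go, List.nil_append, hfind, qtb_find_go]
  by_cases hm : '"' ∈ text.toList
  · have hnq : '"' ∉ text.toList.takeWhile (· ≠ '"') := by
      intro hq
      have := List.mem_takeWhile_imp hq
      simp at this
    have hne : text.toList.dropWhile (· ≠ '"') ≠ [] := by
      intro h0
      have hall := List.dropWhile_eq_nil_iff.mp h0 _ hm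
      simp at hall
    obtain ⟨a, t, hrt⟩ := List.exists_cons_of_ne_nil hne
    have ha : a = '"' := by
      have := List.head_dropWhile_not (p := fun c => decide (c ≠ '"')) hne
      simp only [hrt, List.head_cons] at this
      simpa using this
    subst ha
    have hsplit : text.toList = text.toList.takeWhile (· ≠ '"') ++ '"' :: t := by
      conv_lhs => rw [← List.takeWhile_append_dropWhile (p := fun c => decide (c ≠ '"'))
        (l := text.toList), hrt]
    simp only [hm, if_true, Nat.zero_add]
    revert hnq hsplit
    generalize text.toList.takeWhile (· ≠ '"') = pre
    intro hnq hsplit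
    rw [hsplit]
    rw [if_neg (show ¬((pre.length : Int) = -1) by omega)]
    rw [PySem.List.slice_to _ (by omega), PySem.List.slice_from _ (by omega)]
    rw [show ((pre.length : Int)).toNat = pre.length by omega]
    rw [show ((pre.length : Int) + 1).toNat = pre.length + 1 by omega]
    rw [List.take_left, qtbGo_true_split _ _ hnq]
    rw [show pre ++ '"' :: t = (pre ++ ['"']) ++ t by simp]
    rw [List.drop_left' (by simp), qtb_replace]
    simp
  · simp only [hm, if_false]
    rw [qtbGo_true_no_quote _ hm]
    simp [String.ofList_toList]
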